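-- pv_equiv track=rewrite | github.com/InterGenJLU/voqr-public | server/tts_normalizer.py | _normalize_fractions
-- ===== SOURCE A (Python) =====
-- def _normalize_fractions(text: str) -> str:
--     """Simple fractions: 1/2 → one half, 3/4 → three quarters."""
--     fraction_words = {
--         "1/2": "one half",
--         "1/3": "one third",
--         "2/3": "two thirds",
--         "1/4": "one quarter",
--         "3/4": "three quarters",
--     }
--     for frac, spoken in fraction_words.items():
--         text = text.replace(frac, spoken)
--     return text
-- ===== SOURCE B (Python) =====
-- def _normalize_fractions(text: str) -> str:
--     """Simple fractions: 1/2 -> one half, 3/4 -> three quarters.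
--
--     Single left-to-right pass: every fraction key is 3 characters long, so at
--     each position look the 3-char window up in the table; emit the spoken form
--     and skip 3 characters on a hit, otherwise emit the character.
--     """
--     fraction_words = {
--         "1/2": "one half",
--         "1/3": "one third",
--         "2/3": "two thirds",
--         "1/4": "one quarter",
--         "3/4": "three quarters",
--     }
--     out = []
--     i = 0
--     n = len(text)
--     while i < n:
--         spoken = fraction_words.get(text[i:i + 3])
--         if spoken is None:
--             out.append(text[i])
--             i += 1
--         else:
--             out.append(spoken)
--             i += 3
--     return "".join(out)
-- ===== Notes on version B (the rewrite author's own statement) =====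
-- stated objective: alternative
-- what changed: Replaces five sequential whole-string replace passes with one left-to-right pass that looks each 3-character window up in the fraction table (valid because no replacement reintroduces a key and key priorities coincide with leftmost matching).
import Mathlib
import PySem

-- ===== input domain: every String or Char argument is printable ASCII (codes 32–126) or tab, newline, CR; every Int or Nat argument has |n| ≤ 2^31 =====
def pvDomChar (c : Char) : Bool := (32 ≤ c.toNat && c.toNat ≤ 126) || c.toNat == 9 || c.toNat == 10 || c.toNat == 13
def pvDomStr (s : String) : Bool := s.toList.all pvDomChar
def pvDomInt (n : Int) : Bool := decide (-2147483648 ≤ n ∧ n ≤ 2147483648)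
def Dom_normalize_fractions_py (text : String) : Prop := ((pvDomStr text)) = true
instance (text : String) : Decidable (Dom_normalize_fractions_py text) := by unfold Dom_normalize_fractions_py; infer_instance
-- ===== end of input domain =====

set_option maxRecDepth 4000


-- B replaces A's five sequential whole-string replace passes by ONE left-to-right pass
-- that looks each 3-character window up in the fraction table (alternative decomposition).

-- ===== PORT A =====
-- A: dict of fractions, then one text.replace pass per entry, in insertion order.
def pvFractionWordsA : PySem.Dict String String :=
  PySem.Dict.ofList
    [ ("1/2", "one half"),
      ("1/3", "one third"),
      ("2/3", "two thirds"),
      ("1/4", "one quarter"),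
      ("3/4", "three quarters") ]

def normalize_fractions_py (text : String) : String :=
  (PySem.Dict.items pvFractionWordsA).foldl
    (fun t p => PySem.Str.replace t p.1 p.2) text

-- ===== PORT B =====
-- B: the same table (keys/values as their character lists: the port works on text.toList),
-- then a single scan: look the 3-char window up; emit the spoken form and skip 3 on
-- a hit, else emit the character; join the collected pieces at the end.
def pvFractionWordsB : PySem.Dict (List Char) (List Char) :=
  PySem.Dict.ofList
    [ (['1','/','2'], ['o','n','e',' ','h','a','l','f']),
      (['1','/','3'], ['o','n','e',' ','t','h','i','r','d']),
      (['2','/','3'], ['t','w','o',' ','t','h','i','r','d','s']),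
      (['1','/','4'], ['o','n','e',' ','q','u','a','r','t','e','r']),
      (['3','/','4'], ['t','h','r','e','e',' ','q','u','a','r','t','e','r','s']) ]

-- the while loop of Source B: l is text[i:], out the accumulated pieces (most recent first)
def pvGoB : List Char → List (List Char) → List Char
  | [], out => PySem.Chars.join [] out.reverse
  | c :: t, out =>
    match pvFractionWordsB.get? (List.take 3 (c :: t)) with
    | some spoken => pvGoB (t.drop 2) (spoken :: out)
    | none => pvGoB t ([c] :: out)
termination_by l _ => l.length
decreasing_by
  · simp only [List.length_cons, List.length_drop]; omega
  · simp

def normalize_fractions_py_alt (text : String) : String :=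
  String.ofList (pvGoB text.toList [])

-- ===== PRECONDITION & SPEC =====
def Spec_normalize_fractions_py (text : String) (out : String) : Prop := out = normalize_fractions_py_alt text
instance (text : String) (out : String) : Decidable (Spec_normalize_fractions_py text out) := by unfold Spec_normalize_fractions_py; infer_instance

-- ===== CLAIM (what is proved, stated in full; the proofs are below) =====
def Claim_equal_normalize_fractions_py : Prop := ∀ (text : String), Dom_normalize_fractions_py text → Spec_normalize_fractions_py text (normalize_fractions_py text)

-- ===== LEMMAS AND PROOFS =====

-- structural version of one Python str.replace pass (agrees with it for nonempty `old`)
def pvRepl1 (old new : List Char) : List Char → List Char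
  | [] => []
  | c :: t =>
    if old.isPrefixOf (c :: t) then new ++ pvRepl1 old new (t.drop (old.length - 1))
    else c :: pvRepl1 old new t
termination_by l => l.length
decreasing_by
  · simp only [List.length_cons, List.length_drop]; omega
  · simp

theorem pvGo_eq_repl1 (old new : List Char) (hold : old ≠ []) :
    ∀ fuel l acc, l.length ≤ fuel →
      PySem.Chars.replace.go old new fuel l acc = acc.reverse ++ pvRepl1 old new l := by
  intro fuel
  induction fuel with
  | zero =>
    intro l acc h
    have : l = [] := List.eq_nil_of_length_eq_zero (Nat.le_zero.mp h)
    subst this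
    simp [PySem.Chars.replace.go, pvRepl1]
  | succ n ih =>
    intro l acc h
    match l with
    | [] => simp [PySem.Chars.replace.go, pvRepl1]
    | c :: t =>
      rw [PySem.Chars.replace.go]
      by_cases hp : old.isPrefixOf (c :: t)
      · simp only [hp, if_true]
        have hlen : (List.drop old.length (c :: t)).length ≤ n := by
          simp only [List.length_drop, List.length_cons] at *
          have : 1 ≤ old.length := List.length_pos_of_ne_nil hold
          omega
        rw [ih _ _ hlen]
        have hdrop : List.drop old.length (c :: t) = t.drop (old.length - 1) := by
          obtain ⟨o, os, rfl⟩ := List.exists_cons_of_ne_nil hold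
          simp
        rw [hdrop]
        simp [pvRepl1, hp]
      · simp only [hp, if_false]
        rw [ih t (c :: acc) (by simp only [List.length_cons] at h; omega)]
        simp [pvRepl1, hp]

theorem pvReplace_eq_repl1 (old new l : List Char) (hold : old ≠ []) :
    PySem.Chars.replace l old new = pvRepl1 old new l := by
  unfold PySem.Chars.replace
  rw [if_neg (by simpa using hold)]
  simpa using pvGo_eq_repl1 old new hold l.length l [] le_rfl

-- the five (pattern, replacement) pairs of A, in order
def pvPairs : List (List Char × List Char) :=
  [ (['1','/','2'], ['o','n','e',' ','h','a','l','f']),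
    (['1','/','3'], ['o','n','e',' ','t','h','i','r','d']),
    (['2','/','3'], ['t','w','o',' ','t','h','i','r','d','s']),
    (['1','/','4'], ['o','n','e',' ','q','u','a','r','t','e','r']),
    (['3','/','4'], ['t','h','r','e','e',' ','q','u','a','r','t','e','r','s']) ]

def pvApply (ps : List (List Char × List Char)) (l : List Char) : List Char :=
  ps.foldl (fun s p => pvRepl1 p.1 p.2 s) l

-- pure functional form of B's scan
def pvScan : List Char → List Char
  | [] => []
  | c :: t =>
    match pvFractionWordsB.get? (List.take 3 (c :: t)) with
    | some spoken => spoken ++ pvScan (t.drop 2)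
    | none => c :: pvScan t
termination_by l => l.length
decreasing_by
  · simp only [List.length_cons, List.length_drop]; omega
  · simp

-- elementary repl1 facts
theorem pvRepl1_cons_of_not (old new : List Char) {c : Char} {t : List Char}
    (h : old.isPrefixOf (c :: t) = false) :
    pvRepl1 old new (c :: t) = c :: pvRepl1 old new t := by
  rw [pvRepl1, if_neg (by simp [h])]

theorem pvRepl1_emit3 (a b d : Char) (new rest : List Char) :
    pvRepl1 [a, b, d] new (a :: b :: d :: rest) = new ++ pvRepl1 [a, b, d] new rest := by
  rw [pvRepl1, if_pos (by simp [List.isPrefixOf])]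
  simp

theorem pvRepl1_append (old new pre X : List Char) (hold : old ≠ [])
    (hdis : ∀ a ∈ pre, a ∉ old) :
    pvRepl1 old new (pre ++ X) = pre ++ pvRepl1 old new X := by
  induction pre with
  | nil => simp
  | cons a pre ih =>
    have hnp : old.isPrefixOf (a :: (pre ++ X)) = false := by
      obtain ⟨o, os, rfl⟩ := List.exists_cons_of_ne_nil hold
      have hao : a ≠ o := by
        intro h; exact hdis a (by simp) (by simp [h])
      simp [List.isPrefixOf, beq_iff_eq, Ne.symm hao]
    rw [List.cons_append, pvRepl1_cons_of_not _ _ hnp,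
      ih (fun x hx => hdis x (by simp [hx]))]
    simp

theorem pvRepl1_peel (old new : List Char) {c : Char} {l X : List Char}
    (hnew : new ≠ []) (hc : c ∉ new) (h : pvRepl1 old new l = c :: X) :
    ∃ l', l = c :: l' ∧ X = pvRepl1 old new l' := by
  match l with
  | [] => simp [pvRepl1] at h
  | c' :: t =>
    cases hp : old.isPrefixOf (c' :: t) with
    | true =>
      rw [pvRepl1, if_pos hp] at h
      obtain ⟨n0, ns, rfl⟩ := List.exists_cons_of_ne_nil hnew
      simp only [List.cons_append, List.cons.injEq] at h
      exact absurd (by simp [h.1]) hc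
    | false =>
      rw [pvRepl1_cons_of_not _ _ hp] at h
      obtain ⟨rfl, rfl⟩ := List.cons.injEq .. |>.mp h
      exact ⟨t, rfl, rfl⟩

theorem pvApply_peel (ps : List (List Char × List Char)) {c : Char} :
    ∀ {l X : List Char}, (∀ p ∈ ps, p.2 ≠ [] ∧ c ∉ p.2) →
      pvApply ps l = c :: X → ∃ l', l = c :: l' ∧ X = pvApply ps l' := by
  induction ps with
  | nil =>
    intro l X _ h
    exact ⟨X, by simpa [pvApply] using h, by simp [pvApply]⟩
  | cons p ps ih =>
    intro l X hps h
    have h' : pvApply ps (pvRepl1 p.1 p.2 l) = c :: X := by simpa [pvApply] using h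
    obtain ⟨m, hm, hX⟩ := ih (fun q hq => hps q (by simp [hq])) h'
    obtain ⟨l', hl', hm'⟩ := pvRepl1_peel p.1 p.2 (hps p (by simp)).1 (hps p (by simp)).2 hm
    exact ⟨l', hl', by rw [hX, hm']; rfl⟩

-- a length-3 pattern that matches after some replace passes already matched before them
theorem pvPrefix_through (ps : List (List Char × List Char)) (a b d c : Char) (t : List Char)
    (hps : ∀ p ∈ ps, p.2 ≠ [] ∧ b ∉ p.2 ∧ d ∉ p.2)
    (h : [a, b, d].isPrefixOf (c :: pvApply ps t) = true) :
    [a, b, d].isPrefixOf (c :: t) = true := by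
  rw [List.isPrefixOf_iff_prefix] at h ⊢
  obtain ⟨rfl, h2⟩ := List.cons_prefix_cons.mp h
  obtain ⟨s, hs⟩ := h2
  simp only [List.cons_append] at hs
  obtain ⟨t1, rfl, h3⟩ :=
    pvApply_peel ps (fun p hp => ⟨(hps p hp).1, (hps p hp).2.1⟩) hs.symm
  obtain ⟨t2, rfl, -⟩ :=
    pvApply_peel ps (fun p hp => ⟨(hps p hp).1, (hps p hp).2.2⟩) h3.symm
  exact List.cons_prefix_cons.mpr ⟨rfl, ⟨t2, by simp⟩⟩

theorem pvGetB_none (c : Char) (t : List Char)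
    (h12 : ¬ ['1','/','2'] <+: (c :: t)) (h13 : ¬ ['1','/','3'] <+: (c :: t))
    (h23 : ¬ ['2','/','3'] <+: (c :: t)) (h14 : ¬ ['1','/','4'] <+: (c :: t))
    (h34 : ¬ ['3','/','4'] <+: (c :: t)) :
    pvFractionWordsB.get? (List.take 3 (c :: t)) = none := by
  have hitems : pvFractionWordsB.items = pvPairs := rfl
  have key : ∀ k : List Char, k.length = 3 → ¬ k <+: (c :: t) → k ≠ List.take 3 (c :: t) := by
    intro k hk hpre heq
    exact hpre (heq ▸ (hk ▸ List.take_prefix k.length (c :: t)))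
  have e12 := beq_eq_false_iff_ne.mpr (key _ rfl h12)
  have e13 := beq_eq_false_iff_ne.mpr (key _ rfl h13)
  have e23 := beq_eq_false_iff_ne.mpr (key _ rfl h23)
  have e14 := beq_eq_false_iff_ne.mpr (key _ rfl h14)
  have e34 := beq_eq_false_iff_ne.mpr (key _ rfl h34)
  simp only [PySem.Dict.get?, hitems, pvPairs, List.find?, e12, e13, e23, e14, e34,
    Option.map_none]


theorem pvSkip3 (o1 o2 o3 a b d : Char) (new X : List Char)
    (h1 : ¬(o1 = a ∧ o2 = b ∧ o3 = d)) (h2 : o1 ≠ b) (h3 : o1 ≠ d) :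
    pvRepl1 [o1,o2,o3] new (a::b::d::X) = a::b::d::pvRepl1 [o1,o2,o3] new X := by
  rw [pvRepl1_cons_of_not _ _ (by simp only [List.isPrefixOf, List.isPrefixOf_nil_left,
        Bool.and_true, Bool.and_eq_false_iff, beq_eq_false_iff_ne, ne_eq]; tauto),
      pvRepl1_cons_of_not _ _ (by simp [List.isPrefixOf, beq_iff_eq, h2]),
      pvRepl1_cons_of_not _ _ (by simp [List.isPrefixOf, beq_iff_eq, h3])]

theorem pvScan_key3 (a b d : Char) (spoken : List Char) (rest : List Char)
    (hg : pvFractionWordsB.get? [a,b,d] = some spoken) :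
    pvScan (a::b::d::rest) = spoken ++ pvScan rest := by
  simp only [pvScan]
  rw [show List.take 3 (a::b::d::rest) = [a,b,d] from rfl, hg]
  simp

theorem pvScan_none (c : Char) (t : List Char)
    (hg : pvFractionWordsB.get? (List.take 3 (c::t)) = none) :
    pvScan (c::t) = c :: pvScan t := by
  simp only [pvScan, hg]

theorem pvDis_12_13 : ∀ a ∈ (['o','n','e',' ','h','a','l','f'] : List Char), a ∉ (['1','/','3'] : List Char) := by simp
theorem pvDis_12_23 : ∀ a ∈ (['o','n','e',' ','h','a','l','f'] : List Char), a ∉ (['2','/','3'] : List Char) := by simp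
theorem pvDis_12_14 : ∀ a ∈ (['o','n','e',' ','h','a','l','f'] : List Char), a ∉ (['1','/','4'] : List Char) := by simp
theorem pvDis_12_34 : ∀ a ∈ (['o','n','e',' ','h','a','l','f'] : List Char), a ∉ (['3','/','4'] : List Char) := by simp
theorem pvDis_13_23 : ∀ a ∈ (['o','n','e',' ','t','h','i','r','d'] : List Char), a ∉ (['2','/','3'] : List Char) := by simp
theorem pvDis_13_14 : ∀ a ∈ (['o','n','e',' ','t','h','i','r','d'] : List Char), a ∉ (['1','/','4'] : List Char) := by simp
theorem pvDis_13_34 : ∀ a ∈ (['o','n','e',' ','t','h','i','r','d'] : List Char), a ∉ (['3','/','4'] : List Char) := by simp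
theorem pvNe_13 : (['1','/','3'] : List Char) ≠ [] := by simp
theorem pvDis_23_14 : ∀ a ∈ (['t','w','o',' ','t','h','i','r','d','s'] : List Char), a ∉ (['1','/','4'] : List Char) := by simp
theorem pvDis_23_34 : ∀ a ∈ (['t','w','o',' ','t','h','i','r','d','s'] : List Char), a ∉ (['3','/','4'] : List Char) := by simp
theorem pvNe_23 : (['2','/','3'] : List Char) ≠ [] := by simp
theorem pvDis_14_34 : ∀ a ∈ (['o','n','e',' ','q','u','a','r','t','e','r'] : List Char), a ∉ (['3','/','4'] : List Char) := by simp
theorem pvNe_14 : (['1','/','4'] : List Char) ≠ [] := by simp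
theorem pvNe_34 : (['3','/','4'] : List Char) ≠ [] := by simp
theorem pvThru_13 : ∀ p ∈ ([(['1','/','2'], ['o','n','e',' ','h','a','l','f'])] : List (List Char × List Char)), p.2 ≠ [] ∧ '/' ∉ p.2 ∧ '3' ∉ p.2 := by simp
theorem pvThru_23 : ∀ p ∈ ([(['1','/','2'], ['o','n','e',' ','h','a','l','f']), (['1','/','3'], ['o','n','e',' ','t','h','i','r','d'])] : List (List Char × List Char)), p.2 ≠ [] ∧ '/' ∉ p.2 ∧ '3' ∉ p.2 := by simp
theorem pvThru_14 : ∀ p ∈ ([(['1','/','2'], ['o','n','e',' ','h','a','l','f']), (['1','/','3'], ['o','n','e',' ','t','h','i','r','d']), (['2','/','3'], ['t','w','o',' ','t','h','i','r','d','s'])] : List (List Char × List Char)), p.2 ≠ [] ∧ '/' ∉ p.2 ∧ '4' ∉ p.2 := by simp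
theorem pvThru_34 : ∀ p ∈ ([(['1','/','2'], ['o','n','e',' ','h','a','l','f']), (['1','/','3'], ['o','n','e',' ','t','h','i','r','d']), (['2','/','3'], ['t','w','o',' ','t','h','i','r','d','s']), (['1','/','4'], ['o','n','e',' ','q','u','a','r','t','e','r'])] : List (List Char × List Char)), p.2 ≠ [] ∧ '/' ∉ p.2 ∧ '4' ∉ p.2 := by simp

theorem pvMainAux : ∀ n l, l.length ≤ n → pvApply pvPairs l = pvScan l := by
  intro n
  induction n with
  | zero =>
    intro l h
    have : l = [] := List.eq_nil_of_length_eq_zero (Nat.le_zero.mp h)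
    subst this
    simp [pvApply, pvPairs, pvRepl1, pvScan]
  | succ n ih =>
    intro l hlen
    match l with
    | [] => simp [pvApply, pvPairs, pvRepl1, pvScan]
    | c :: t =>
      simp only [pvApply, pvPairs, List.foldl]
      cases h12 : List.isPrefixOf ['1','/','2'] (c :: t) with
      | true =>
        obtain ⟨rest, hrest⟩ := List.isPrefixOf_iff_prefix.mp h12
        have hlen2 : rest.length ≤ n := by
          have hL := congrArg List.length hrest
          simp only [List.length_append, List.length_cons] at hL hlen
          omega
        rw [← hrest]
        simp only [List.cons_append, List.nil_append]
        rw [pvRepl1_emit3 '1' '/' '2' _ _]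
        rw [pvRepl1_append ['1','/','3'] _ ['o','n','e',' ','h','a','l','f'] _ pvNe_13 pvDis_12_13]
        rw [pvRepl1_append ['2','/','3'] _ ['o','n','e',' ','h','a','l','f'] _ pvNe_23 pvDis_12_23]
        rw [pvRepl1_append ['1','/','4'] _ ['o','n','e',' ','h','a','l','f'] _ pvNe_14 pvDis_12_14]
        rw [pvRepl1_append ['3','/','4'] _ ['o','n','e',' ','h','a','l','f'] _ pvNe_34 pvDis_12_34]
        rw [pvScan_key3 '1' '/' '2' ['o','n','e',' ','h','a','l','f'] _ rfl]
        have hr := ih rest hlen2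
        simp only [pvApply, pvPairs, List.foldl] at hr
        rw [hr]
      | false =>
        cases h13 : List.isPrefixOf ['1','/','3'] (c :: t) with
        | true =>
          obtain ⟨rest, hrest⟩ := List.isPrefixOf_iff_prefix.mp h13
          have hlen2 : rest.length ≤ n := by
            have hL := congrArg List.length hrest
            simp only [List.length_append, List.length_cons] at hL hlen
            omega
          rw [← hrest]
          simp only [List.cons_append, List.nil_append]
          rw [pvSkip3 '1' '/' '2' '1' '/' '3' _ _ (by decide) (by decide) (by decide)]
          rw [pvRepl1_emit3 '1' '/' '3' _ _]
          rw [pvRepl1_append ['2','/','3'] _ ['o','n','e',' ','t','h','i','r','d'] _ pvNe_23 pvDis_13_23]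
          rw [pvRepl1_append ['1','/','4'] _ ['o','n','e',' ','t','h','i','r','d'] _ pvNe_14 pvDis_13_14]
          rw [pvRepl1_append ['3','/','4'] _ ['o','n','e',' ','t','h','i','r','d'] _ pvNe_34 pvDis_13_34]
          rw [pvScan_key3 '1' '/' '3' ['o','n','e',' ','t','h','i','r','d'] _ rfl]
          have hr := ih rest hlen2
          simp only [pvApply, pvPairs, List.foldl] at hr
          rw [hr]
        | false =>
          cases h23 : List.isPrefixOf ['2','/','3'] (c :: t) with
          | true =>
            obtain ⟨rest, hrest⟩ := List.isPrefixOf_iff_prefix.mp h23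
            have hlen2 : rest.length ≤ n := by
              have hL := congrArg List.length hrest
              simp only [List.length_append, List.length_cons] at hL hlen
              omega
            rw [← hrest]
            simp only [List.cons_append, List.nil_append]
            rw [pvSkip3 '1' '/' '2' '2' '/' '3' _ _ (by decide) (by decide) (by decide)]
            rw [pvSkip3 '1' '/' '3' '2' '/' '3' _ _ (by decide) (by decide) (by decide)]
            rw [pvRepl1_emit3 '2' '/' '3' _ _]
            rw [pvRepl1_append ['1','/','4'] _ ['t','w','o',' ','t','h','i','r','d','s'] _ pvNe_14 pvDis_23_14]
            rw [pvRepl1_append ['3','/','4'] _ ['t','w','o',' ','t','h','i','r','d','s'] _ pvNe_34 pvDis_23_34]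
            rw [pvScan_key3 '2' '/' '3' ['t','w','o',' ','t','h','i','r','d','s'] _ rfl]
            have hr := ih rest hlen2
            simp only [pvApply, pvPairs, List.foldl] at hr
            rw [hr]
          | false =>
            cases h14 : List.isPrefixOf ['1','/','4'] (c :: t) with
            | true =>
              obtain ⟨rest, hrest⟩ := List.isPrefixOf_iff_prefix.mp h14
              have hlen2 : rest.length ≤ n := by
                have hL := congrArg List.length hrest
                simp only [List.length_append, List.length_cons] at hL hlen
                omega
              rw [← hrest]
              simp only [List.cons_append, List.nil_append]
              rw [pvSkip3 '1' '/' '2' '1' '/' '4' _ _ (by decide) (by decide) (by decide)]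
              rw [pvSkip3 '1' '/' '3' '1' '/' '4' _ _ (by decide) (by decide) (by decide)]
              rw [pvSkip3 '2' '/' '3' '1' '/' '4' _ _ (by decide) (by decide) (by decide)]
              rw [pvRepl1_emit3 '1' '/' '4' _ _]
              rw [pvRepl1_append ['3','/','4'] _ ['o','n','e',' ','q','u','a','r','t','e','r'] _ pvNe_34 pvDis_14_34]
              rw [pvScan_key3 '1' '/' '4' ['o','n','e',' ','q','u','a','r','t','e','r'] _ rfl]
              have hr := ih rest hlen2
              simp only [pvApply, pvPairs, List.foldl] at hr
              rw [hr]
            | false =>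
              cases h34 : List.isPrefixOf ['3','/','4'] (c :: t) with
              | true =>
                obtain ⟨rest, hrest⟩ := List.isPrefixOf_iff_prefix.mp h34
                have hlen2 : rest.length ≤ n := by
                  have hL := congrArg List.length hrest
                  simp only [List.length_append, List.length_cons] at hL hlen
                  omega
                rw [← hrest]
                simp only [List.cons_append, List.nil_append]
                rw [pvSkip3 '1' '/' '2' '3' '/' '4' _ _ (by decide) (by decide) (by decide)]
                rw [pvSkip3 '1' '/' '3' '3' '/' '4' _ _ (by decide) (by decide) (by decide)]
                rw [pvSkip3 '2' '/' '3' '3' '/' '4' _ _ (by decide) (by decide) (by decide)]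
                rw [pvSkip3 '1' '/' '4' '3' '/' '4' _ _ (by decide) (by decide) (by decide)]
                rw [pvRepl1_emit3 '3' '/' '4' _ _]
                rw [pvScan_key3 '3' '/' '4' ['t','h','r','e','e',' ','q','u','a','r','t','e','r','s'] _ rfl]
                have hr := ih rest hlen2
                simp only [pvApply, pvPairs, List.foldl] at hr
                rw [hr]
              | false =>
                have p12 : ¬ ['1','/','2'] <+: (c :: t) := by simp [← List.isPrefixOf_iff_prefix, h12]
                have p13 : ¬ ['1','/','3'] <+: (c :: t) := by simp [← List.isPrefixOf_iff_prefix, h13]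
                have p23 : ¬ ['2','/','3'] <+: (c :: t) := by simp [← List.isPrefixOf_iff_prefix, h23]
                have p14 : ¬ ['1','/','4'] <+: (c :: t) := by simp [← List.isPrefixOf_iff_prefix, h14]
                have p34 : ¬ ['3','/','4'] <+: (c :: t) := by simp [← List.isPrefixOf_iff_prefix, h34]
                have hg := pvGetB_none c t p12 p13 p23 p14 p34
                have b13 : List.isPrefixOf ['1','/','3'] (c :: pvRepl1 ['1','/','2'] ['o','n','e',' ','h','a','l','f'] (t)) = false := by
                  cases hb : List.isPrefixOf ['1','/','3'] (c :: pvRepl1 ['1','/','2'] ['o','n','e',' ','h','a','l','f'] (t)) with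
                  | false => rfl
                  | true =>
                    have hthru := pvPrefix_through [(['1','/','2'], ['o','n','e',' ','h','a','l','f'])] '1' '/' '3' c t pvThru_13 (by simpa only [pvApply, List.foldl] using hb)
                    simp [hthru] at h13
                have b23 : List.isPrefixOf ['2','/','3'] (c :: pvRepl1 ['1','/','3'] ['o','n','e',' ','t','h','i','r','d'] (pvRepl1 ['1','/','2'] ['o','n','e',' ','h','a','l','f'] (t))) = false := by
                  cases hb : List.isPrefixOf ['2','/','3'] (c :: pvRepl1 ['1','/','3'] ['o','n','e',' ','t','h','i','r','d'] (pvRepl1 ['1','/','2'] ['o','n','e',' ','h','a','l','f'] (t))) with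
                  | false => rfl
                  | true =>
                    have hthru := pvPrefix_through [(['1','/','2'], ['o','n','e',' ','h','a','l','f']), (['1','/','3'], ['o','n','e',' ','t','h','i','r','d'])] '2' '/' '3' c t pvThru_23 (by simpa only [pvApply, List.foldl] using hb)
                    simp [hthru] at h23
                have b14 : List.isPrefixOf ['1','/','4'] (c :: pvRepl1 ['2','/','3'] ['t','w','o',' ','t','h','i','r','d','s'] (pvRepl1 ['1','/','3'] ['o','n','e',' ','t','h','i','r','d'] (pvRepl1 ['1','/','2'] ['o','n','e',' ','h','a','l','f'] (t)))) = false := by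
                  cases hb : List.isPrefixOf ['1','/','4'] (c :: pvRepl1 ['2','/','3'] ['t','w','o',' ','t','h','i','r','d','s'] (pvRepl1 ['1','/','3'] ['o','n','e',' ','t','h','i','r','d'] (pvRepl1 ['1','/','2'] ['o','n','e',' ','h','a','l','f'] (t)))) with
                  | false => rfl
                  | true =>
                    have hthru := pvPrefix_through [(['1','/','2'], ['o','n','e',' ','h','a','l','f']), (['1','/','3'], ['o','n','e',' ','t','h','i','r','d']), (['2','/','3'], ['t','w','o',' ','t','h','i','r','d','s'])] '1' '/' '4' c t pvThru_14 (by simpa only [pvApply, List.foldl] using hb)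
                    simp [hthru] at h14
                have b34 : List.isPrefixOf ['3','/','4'] (c :: pvRepl1 ['1','/','4'] ['o','n','e',' ','q','u','a','r','t','e','r'] (pvRepl1 ['2','/','3'] ['t','w','o',' ','t','h','i','r','d','s'] (pvRepl1 ['1','/','3'] ['o','n','e',' ','t','h','i','r','d'] (pvRepl1 ['1','/','2'] ['o','n','e',' ','h','a','l','f'] (t))))) = false := by
                  cases hb : List.isPrefixOf ['3','/','4'] (c :: pvRepl1 ['1','/','4'] ['o','n','e',' ','q','u','a','r','t','e','r'] (pvRepl1 ['2','/','3'] ['t','w','o',' ','t','h','i','r','d','s'] (pvRepl1 ['1','/','3'] ['o','n','e',' ','t','h','i','r','d'] (pvRepl1 ['1','/','2'] ['o','n','e',' ','h','a','l','f'] (t))))) with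
                  | false => rfl
                  | true =>
                    have hthru := pvPrefix_through [(['1','/','2'], ['o','n','e',' ','h','a','l','f']), (['1','/','3'], ['o','n','e',' ','t','h','i','r','d']), (['2','/','3'], ['t','w','o',' ','t','h','i','r','d','s']), (['1','/','4'], ['o','n','e',' ','q','u','a','r','t','e','r'])] '3' '/' '4' c t pvThru_34 (by simpa only [pvApply, List.foldl] using hb)
                    simp [hthru] at h34
                rw [pvRepl1_cons_of_not _ _ h12, pvRepl1_cons_of_not _ _ b13, pvRepl1_cons_of_not _ _ b23, pvRepl1_cons_of_not _ _ b14, pvRepl1_cons_of_not _ _ b34, pvScan_none c t hg]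
                have hr := ih t (by simp only [List.length_cons] at hlen; omega)
                simp only [pvApply, pvPairs, List.foldl] at hr
                rw [hr]

theorem pvStrReplace (s o n : String) (h : o.toList ≠ []) :
    PySem.Str.replace s o n = String.ofList (pvRepl1 o.toList n.toList s.toList) := by
  have e : PySem.Str.replace s o n
      = String.ofList (PySem.Chars.replace s.toList o.toList n.toList) := rfl
  rw [e, pvReplace_eq_repl1 _ _ _ h]

theorem pvA_eq (text : String) :
    normalize_fractions_py text = String.ofList (pvApply pvPairs text.toList) := by
  unfold normalize_fractions_py
  rw [show PySem.Dict.items pvFractionWordsA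
      = [("1/2","one half"),("1/3","one third"),("2/3","two thirds"),
         ("1/4","one quarter"),("3/4","three quarters")] from rfl]
  simp only [List.foldl]
  rw [pvStrReplace _ "1/2" _ (by decide), pvStrReplace _ "1/3" _ (by decide),
      pvStrReplace _ "2/3" _ (by decide), pvStrReplace _ "1/4" _ (by decide),
      pvStrReplace _ "3/4" _ (by decide)]
  simp only [String.toList_ofList]
  rw [show ("1/2" : String).toList = ['1','/','2'] from by decide,
      show ("1/3" : String).toList = ['1','/','3'] from by decide,
      show ("2/3" : String).toList = ['2','/','3'] from by decide,
      show ("1/4" : String).toList = ['1','/','4'] from by decide,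
      show ("3/4" : String).toList = ['3','/','4'] from by decide,
      show ("one half" : String).toList = ['o','n','e',' ','h','a','l','f'] from by decide,
      show ("one third" : String).toList = ['o','n','e',' ','t','h','i','r','d'] from by decide,
      show ("two thirds" : String).toList = ['t','w','o',' ','t','h','i','r','d','s'] from by decide,
      show ("one quarter" : String).toList = ['o','n','e',' ','q','u','a','r','t','e','r'] from by decide,
      show ("three quarters" : String).toList
        = ['t','h','r','e','e',' ','q','u','a','r','t','e','r','s'] from by decide]
  simp only [pvApply, pvPairs, List.foldl]

theorem pvJoinNil : ∀ xs : List (List Char), PySem.Chars.join [] xs = xs.flatten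
  | [] => rfl
  | [x] => by simp [PySem.Chars.join, List.intercalate]
  | x :: y :: t => by
    have ih := pvJoinNil (y :: t)
    simp only [PySem.Chars.join, List.intercalate] at ih ⊢
    rw [List.intersperse_cons₂]
    simp only [List.flatten_cons, List.nil_append]
    rw [show (List.intersperse [] (y :: t)).flatten
        = List.flatten (y :: t) from ih]
    simp

theorem pvGoB_eq : ∀ (l : List Char) (out : List (List Char)),
    pvGoB l out = out.reverse.flatten ++ pvScan l := by
  intro l
  induction l using pvScan.induct with
  | case1 => intro out; simp [pvGoB, pvScan, pvJoinNil]
  | case2 c t spoken hg ih =>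
    intro out
    simp only [pvGoB, hg, pvScan, ih, List.reverse_cons, List.flatten_append,
      List.flatten_cons, List.flatten_nil, List.append_nil, List.append_assoc]
  | case3 c t hg ih =>
    intro out
    simp only [pvGoB, hg, pvScan, ih, List.reverse_cons, List.flatten_append,
      List.flatten_cons, List.flatten_nil, List.append_nil, List.append_assoc,
      List.singleton_append]

theorem pvB_eq (text : String) :
    normalize_fractions_py_alt text = String.ofList (pvScan text.toList) := by
  unfold normalize_fractions_py_alt
  rw [pvGoB_eq]
  simp

-- ===== VERDICT (by name: the statement is the Claim_ definition above) =====
theorem normalize_fractions_py_spec : Claim_equal_normalize_fractions_py := by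
  intro text _
  unfold Spec_normalize_fractions_py
  rw [pvA_eq, pvB_eq, pvMainAux text.toList.length text.toList le_rfl]
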